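-- pv_equiv track=rewrite | github.com/anjakovacevic/uni | sausau/zadzavezbu1.py | prviZadatak
-- ===== SOURCE A (Python) =====
-- def prviZadatak(niz):
--     donjaGranica = 0
--     gornjaGranica = len(niz)-1
--     while donjaGranica <= gornjaGranica:
--         sredina = (donjaGranica+gornjaGranica) // 2
--         if niz[sredina] == sredina:
--             donjaGranica=sredina+1
--         else:
--             gornjaGranica=sredina-1
--     return donjaGranica
-- ===== SOURCE B (Python) =====
-- def prviZadatak(niz):
--     # recursive divide-and-conquer on (lo, size) instead of an iterative while over (lo, hi)
--     def go(lo, size):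
--         if size <= 0:
--             return lo
--         half = (size - 1) // 2
--         mid = lo + half
--         if niz[mid] == mid:
--             return go(mid + 1, size - 1 - half)
--         return go(lo, half)
--     return go(0, len(niz))
-- ===== Notes on version B (the rewrite author's own statement) =====
-- stated objective: alternative
-- what changed: The iterative while loop mutating the two bounds (donjaGranica, gornjaGranica) is replaced by a recursive divide-and-conquer helper go(lo, size) over the interval's start and length, with the same probe sequence.
import Mathlib
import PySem

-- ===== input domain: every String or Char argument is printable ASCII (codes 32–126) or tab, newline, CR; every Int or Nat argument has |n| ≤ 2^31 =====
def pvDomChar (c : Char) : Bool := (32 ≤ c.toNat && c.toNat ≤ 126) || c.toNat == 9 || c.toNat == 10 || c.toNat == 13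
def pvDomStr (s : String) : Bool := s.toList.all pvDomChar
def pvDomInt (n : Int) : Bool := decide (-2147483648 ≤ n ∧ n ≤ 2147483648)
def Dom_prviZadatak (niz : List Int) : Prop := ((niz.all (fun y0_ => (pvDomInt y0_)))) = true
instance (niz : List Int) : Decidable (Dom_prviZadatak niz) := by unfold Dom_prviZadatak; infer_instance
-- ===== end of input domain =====

-- B re-implements A's binary search as a recursive divide-and-conquer over (lo, size)
-- instead of an iterative while loop over two mutable bounds; same probe sequence, objective: alternative.

-- ===== PORT A =====
-- the while loop over the mutable bounds (donjaGranica, gornjaGranica); niz[sredina] is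
-- ported with pyGet? (the index is in range on every reachable state, so the `some` match is exact)
def prviZadatakGo (niz : List Int) (lo hi : Int) : Int :=
  if h : lo ≤ hi then
    let sredina := PySem.Int.floordiv (lo + hi) 2
    if PySem.List.pyGet? niz sredina = some sredina then
      prviZadatakGo niz (sredina + 1) hi
    else
      prviZadatakGo niz lo (sredina - 1)
  else lo
termination_by (hi + 1 - lo).toNat
decreasing_by
  · have := PySem.Int.floordiv_two_mid_bounds h; omega
  · have := PySem.Int.floordiv_two_mid_bounds h; omega

def prviZadatak (niz : List Int) : Int :=
  prviZadatakGo niz 0 ((niz.length : Int) - 1)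

-- ===== PORT B =====
-- B's inner recursive go(lo, size); size is a Nat (it starts at len(niz) and never goes negative)
def prviZadatakAltGo (niz : List Int) (lo : Int) (size : Nat) : Int :=
  if size = 0 then lo
  else
    let half := (size - 1) / 2
    let mid := lo + (half : Int)
    if PySem.List.pyGet? niz mid = some mid then
      prviZadatakAltGo niz (mid + 1) (size - 1 - half)
    else
      prviZadatakAltGo niz lo half
termination_by size
decreasing_by all_goals omega

def prviZadatak_alt (niz : List Int) : Int :=
  prviZadatakAltGo niz 0 niz.length

-- ===== PRECONDITION & SPEC =====
def Spec_prviZadatak (niz : List Int) (out : Int) : Prop := out = prviZadatak_alt niz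
instance (niz : List Int) (out : Int) : Decidable (Spec_prviZadatak niz out) := by unfold Spec_prviZadatak; infer_instance

-- ===== CLAIM (what is proved, stated in full; the proofs are below) =====
def Claim_equal_prviZadatak : Prop := ∀ (niz : List Int), Dom_prviZadatak niz → Spec_prviZadatak niz (prviZadatak niz)

-- ===== LEMMAS AND PROOFS =====

-- Core correspondence: the loop state (lo, hi) and B's state (lo, size) are linked by size = (hi+1-lo).toNat.
theorem go_eq (niz : List Int) :
    ∀ (size : Nat) (lo hi : Int), (hi + 1 - lo).toNat = size →
      prviZadatakGo niz lo hi = prviZadatakAltGo niz lo size := by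
  intro size
  induction size using Nat.strong_induction_on with
  | _ size ih =>
    intro lo hi hsz
    rw [prviZadatakGo, prviZadatakAltGo]
    by_cases h : lo ≤ hi
    · have hs0 : size ≠ 0 := by omega
      have hmid : PySem.Int.floordiv (lo + hi) 2 = lo + (((size - 1) / 2 : Nat) : Int) := by
        rw [PySem.Int.floordiv_eq_ediv_of_pos (by norm_num)]
        omega
      simp only [dif_pos h, if_neg hs0, hmid]
      by_cases hc : PySem.List.pyGet? niz (lo + (((size - 1) / 2 : Nat) : Int))
            = some (lo + (((size - 1) / 2 : Nat) : Int))
      · simp only [if_pos hc]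
        exact ih (size - 1 - (size - 1) / 2) (by omega) _ _ (by omega)
      · simp only [if_neg hc]
        exact ih ((size - 1) / 2) (by omega) _ _ (by omega)
    · have hs0 : size = 0 := by omega
      simp [h, hs0]

-- ===== VERDICT (by name: the statement is the Claim_ definition above) =====
theorem prviZadatak_spec : Claim_equal_prviZadatak := by
  intro niz _
  unfold Spec_prviZadatak prviZadatak prviZadatak_alt
  exact go_eq niz niz.length 0 ((niz.length : Int) - 1) (by omega)
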